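-- pv_equiv track=rewrite | github.com/yecop/system_analisis | workshop_1/taller_as.py | get_motif
-- ===== SOURCE A (Python) =====
-- def get_combinations(n, sequences, bases):
--     if n == 1:
--         return [sequence + base for sequence in sequences for base in bases]
--     else:
--         sequence_ = [sequence + base for sequence in sequences for base in bases]
--         return get_combinations(n - 1, sequence_, bases)
--
-- def count_motif(motif, sequences_db):
--     count = 0
--     for sequence in sequences_db:
--         count += sequence.count(motif)
--     return count
--
-- def get_motif(motif_size, sequences_db):
--     nucleotid_bases = ['A', 'C', 'G', 'T']
--     combinations = get_combinations(motif_size, [""], nucleotid_bases)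
--     max_counter = 0
--     motif_winner = ""
--     for motif_candidate in combinations:
--         temp_counter = count_motif(motif_candidate, sequences_db)
--         if temp_counter > max_counter:
--             max_counter = temp_counter
--             motif_winner = motif_candidate
--     return motif_winner, max_counter
-- ===== SOURCE B (Python) =====
-- def get_motif(motif_size, sequences_db):
--     ACGT = {'A', 'C', 'G', 'T'}
--     kmers = set()
--     for seq in sequences_db:
--         for i in range(len(seq) - motif_size + 1):
--             m = seq[i:i + motif_size]
--             if all(c in ACGT for c in m):
--                 kmers.add(m)
--     winner, best = "", 0
--     for m in sorted(kmers):
--         c = sum(seq.count(m) for seq in sequences_db)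
--         if c > best:
--             winner, best = m, c
--     return winner, best
-- ===== Notes on version B (the rewrite author's own statement) =====
-- stated objective: alternative
-- what changed: Instead of enumerating all 4^k candidate motifs recursively and counting each across the database, B collects the set of length-k ACGT substrings actually present in one scan and picks the lex-smallest argmax of the total non-overlapping count among them.
import Mathlib
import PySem

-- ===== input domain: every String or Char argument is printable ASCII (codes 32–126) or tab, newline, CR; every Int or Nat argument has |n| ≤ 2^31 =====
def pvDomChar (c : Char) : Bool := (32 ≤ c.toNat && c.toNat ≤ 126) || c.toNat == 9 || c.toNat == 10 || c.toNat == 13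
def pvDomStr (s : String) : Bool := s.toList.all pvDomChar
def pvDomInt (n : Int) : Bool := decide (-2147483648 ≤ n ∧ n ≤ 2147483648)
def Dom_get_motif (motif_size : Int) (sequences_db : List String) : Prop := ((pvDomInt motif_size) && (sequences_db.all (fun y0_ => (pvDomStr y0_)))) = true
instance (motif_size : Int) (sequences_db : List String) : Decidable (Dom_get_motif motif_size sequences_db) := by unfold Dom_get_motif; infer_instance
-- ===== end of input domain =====

-- B enumerates only the length-k ACGT substrings actually present in the database (a set built
-- in one scan) and takes the lex-least argmax of the total count, instead of A's brute-force
-- loop over all 4^k candidate motifs (objective: alternative).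

-- ===== PORT A =====
-- get_combinations(n, sequences, bases); for n ≤ 0 the Python recurses without end (excluded by
-- Pre_), the `n < 1` guard only makes the Lean function total there.
def pvGetCombinations (n : Int) (sequences : List (List Char)) (bases : List (List Char)) : List (List Char) :=
  if n = 1 then sequences.flatMap (fun s => bases.map (fun b => s ++ b))
  else if n < 1 then sequences
  else pvGetCombinations (n - 1) (sequences.flatMap (fun s => bases.map (fun b => s ++ b))) bases
termination_by n.toNat
decreasing_by omega

-- count_motif(motif, sequences_db)
def pvCountMotif (motif : List Char) (sequences_db : List String) : Int :=
  sequences_db.foldl (fun count s => count + (PySem.Chars.count s.toList motif : Int)) 0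

def get_motif (motif_size : Int) (sequences_db : List String) : String × Int :=
  let nucleotid_bases : List (List Char) := [['A'], ['C'], ['G'], ['T']]
  let combinations := pvGetCombinations motif_size [[]] nucleotid_bases
  let r := combinations.foldl (fun st motif_candidate =>
      let temp_counter := pvCountMotif motif_candidate sequences_db
      if temp_counter > st.2 then (motif_candidate, temp_counter) else st)
    (([] : List Char), (0 : Int))
  (String.ofList r.1, r.2)

-- ===== PORT B =====
def pvACGT : PySem.Set Char := PySem.Set.ofList ['A', 'C', 'G', 'T']

def get_motif_alt (motif_size : Int) (sequences_db : List String) : String × Int :=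
  let kmers : PySem.Set String := sequences_db.foldl (fun ks seq =>
      (PySem.List.pyRange 0 (PySem.Str.len seq - motif_size + 1) 1).foldl (fun ks i =>
        let m := PySem.Str.slice seq (some i) (some (i + motif_size))
        if m.toList.all (fun c => decide (c ∈ pvACGT)) then PySem.Set.add ks m else ks) ks)
    PySem.Set.empty
  (PySem.List.sorted kmers (fun x => x)).foldl (fun st m =>
      let c := (sequences_db.map (fun seq => (PySem.Str.count seq m : Int))).sum
      if c > st.2 then (m, c) else st)
    ("", (0 : Int))

-- ===== PRECONDITION & SPEC =====
-- Pre_ excludes motif_size ≤ 0, where Python's get_combinations recurses without end (A never returns).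
def Pre_get_motif (motif_size : Int) (sequences_db : List String) : Prop := 1 ≤ motif_size
instance (motif_size : Int) (sequences_db : List String) : Decidable (Pre_get_motif motif_size sequences_db) := by unfold Pre_get_motif; infer_instance
def pvWitness_get_motif : Int × List String := (2, ["ACGTA", "xCGz"])

def Spec_get_motif (motif_size : Int) (sequences_db : List String) (out : String × Int) : Prop := out = get_motif_alt motif_size sequences_db
instance (motif_size : Int) (sequences_db : List String) (out : String × Int) : Decidable (Spec_get_motif motif_size sequences_db out) := by unfold Spec_get_motif; infer_instance

-- ===== CLAIM (what is proved, stated in full; the proofs are below) =====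
def Claim_equal_get_motif : Prop := ∀ (motif_size : Int) (sequences_db : List String), Dom_get_motif motif_size sequences_db → Pre_get_motif motif_size sequences_db → Spec_get_motif motif_size sequences_db (get_motif motif_size sequences_db)

-- ===== LEMMAS AND PROOFS =====

def pvBaseChars : List Char := ['A', 'C', 'G', 'T']

-- all ACGT words of length n, in lexicographic order
def pvWords : Nat → List (List Char)
  | 0 => [[]]
  | n + 1 => (pvWords n).flatMap (fun s => ([['A'], ['C'], ['G'], ['T']] : List (List Char)).map (fun b => s ++ b))

-- total count of a motif over the database, as B computes it
def pvTotal (motif : List Char) (db : List String) : Int :=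
  (db.map (fun s => (PySem.Chars.count s.toList motif : Int))).sum

theorem pvGC_words (n : Nat) : ∀ (j : Nat),
    pvGetCombinations ((n : Int) + 1) (pvWords j) [['A'], ['C'], ['G'], ['T']] = pvWords (j + n + 1) := by
  induction n with
  | zero =>
    intro j
    rw [pvGetCombinations]
    simp [pvWords]
  | succ n ih =>
    intro j
    rw [pvGetCombinations]
    push_cast
    rw [if_neg (by omega : ¬ ((n : Int) + 1 + 1 = 1)), if_neg (by omega : ¬ ((n : Int) + 1 + 1 < 1))]
    have : (n : Int) + 1 + 1 - 1 = (n : Int) + 1 := by ring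
    rw [this]
    have hs : (pvWords j).flatMap (fun s => ([['A'], ['C'], ['G'], ['T']] : List (List Char)).map (fun b => s ++ b)) = pvWords (j + 1) := rfl
    rw [hs, ih (j + 1)]
    congr 1
    omega

theorem pvMem_words (n : Nat) : ∀ (m : List Char),
    m ∈ pvWords n ↔ m.length = n ∧ ∀ c ∈ m, c ∈ pvBaseChars := by
  induction n with
  | zero =>
    intro m
    simp only [pvWords, List.mem_singleton, List.length_eq_zero_iff]
    constructor
    · rintro rfl; simp
    · rintro ⟨rfl, -⟩; rfl
  | succ n ih =>
    intro m
    rw [pvWords, List.mem_flatMap]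
    constructor
    · rintro ⟨s, hs, hm⟩
      simp only [List.mem_map, List.mem_cons] at hm
      obtain ⟨b, hb, rfl⟩ := hm
      obtain ⟨hlen, hch⟩ := (ih s).mp hs
      have hb' : ∃ c, b = [c] ∧ c ∈ pvBaseChars := by
        simp only [pvBaseChars]
        rcases hb with h|h|h|h|h <;> simp_all
      obtain ⟨c, rfl, hc⟩ := hb'
      refine ⟨by simp [hlen], ?_⟩
      intro d hd
      rcases List.mem_append.mp hd with h | h
      · exact hch d h
      · simp at h; subst h; exact hc
    · rintro ⟨hlen, hch⟩
      have hne : m ≠ [] := by intro h; subst h; simp at hlen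
      refine ⟨m.dropLast, ?_, ?_⟩
      · apply (ih m.dropLast).mpr
        constructor
        · simp [List.length_dropLast, hlen]
        · intro c hc; exact hch c (List.mem_of_mem_dropLast hc)
      · have hl := List.dropLast_append_getLast hne
        have hg : m.getLast hne ∈ pvBaseChars := hch _ (List.getLast_mem hne)
        simp only [List.mem_map, List.mem_cons]
        refine ⟨[m.getLast hne], ?_, hl⟩
        simp only [pvBaseChars] at hg
        rcases List.mem_cons.mp hg with h|h
        · simp [h]
        · simp at h; rcases h with h|h|h <;> simp [h]

theorem pvLex_append (u v x y : List Char) (hlen : u.length = v.length)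
    (h : List.Lex (· < ·) u v) : List.Lex (· < ·) (u ++ x) (v ++ y) := by
  induction h with
  | nil => simp at hlen
  | @cons a l₁ l₂ h ih =>
    exact List.Lex.cons (ih (by simpa using hlen))
  | @rel a l₁ b l₂ hab =>
    exact List.Lex.rel hab

theorem pvLex_mid (s : List Char) (c d : Char) (x y : List Char) (h : c < d) :
    List.Lex (· < ·) (s ++ c :: x) (s ++ d :: y) := by
  induction s with
  | nil => exact List.Lex.rel h
  | cons a s ih => exact List.Lex.cons ih

theorem pvStrLt (a b : List Char) :
    List.Lex (· < ·) a b → String.ofList a < String.ofList b := by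
  intro h
  rw [String.lt_iff_toList_lt]
  simpa using (List.lt_iff_lex_lt a b).mpr h

theorem pvStep_pairwise (n : Nat) (S : List (List Char)) (hlen : ∀ s ∈ S, s.length = n)
    (hp : S.Pairwise (List.Lex (· < ·))) :
    (S.flatMap (fun s => ([['A'], ['C'], ['G'], ['T']] : List (List Char)).map (fun b => s ++ b))).Pairwise
      (List.Lex (· < ·)) := by
  induction S with
  | nil => simp
  | cons s S ih =>
    rw [List.flatMap_cons, List.pairwise_append]
    refine ⟨?_, ih (fun t ht => hlen t (List.mem_cons_of_mem _ ht)) (List.Pairwise.of_cons hp), ?_⟩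
    · show List.Pairwise (List.Lex (· < ·)) [s ++ ['A'], s ++ ['C'], s ++ ['G'], s ++ ['T']]
      refine List.Pairwise.cons ?_ (List.Pairwise.cons ?_ (List.Pairwise.cons ?_ (List.pairwise_singleton _ _)))
      all_goals
        intro z hz
        simp only [List.mem_cons, List.not_mem_nil, or_false] at hz
      · rcases hz with rfl|rfl|rfl <;> exact pvLex_mid s _ _ [] [] (by decide)
      · rcases hz with rfl|rfl <;> exact pvLex_mid s _ _ [] [] (by decide)
      · rcases hz with rfl; exact pvLex_mid s _ _ [] [] (by decide)
    · intro x hx y hy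
      simp only [List.mem_map, List.mem_cons] at hx
      obtain ⟨b, hb, rfl⟩ := hx
      rw [List.mem_flatMap] at hy
      obtain ⟨s', hs', hy⟩ := hy
      simp only [List.mem_map, List.mem_cons] at hy
      obtain ⟨b', hb', rfl⟩ := hy
      have hss' : List.Lex (· < ·) s s' := (List.pairwise_cons.mp hp).1 s' hs'
      have : s.length = s'.length := by
        rw [hlen s (List.mem_cons_self), hlen s' (List.mem_cons_of_mem _ hs')]
      exact pvLex_append s s' b b' this hss'

theorem pvWords_pairwise (n : Nat) : (pvWords n).Pairwise (List.Lex (· < ·)) := by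
  induction n with
  | zero => simp [pvWords]
  | succ n ih =>
    rw [pvWords]
    exact pvStep_pairwise n (pvWords n) (fun s hs => ((pvMem_words n s).mp hs).1) ih

theorem pvGo_le (sub : List Char) (fuel : Nat) : ∀ (l : List Char) (acc : Nat),
    acc ≤ PySem.Chars.count.go sub fuel l acc := by
  induction fuel with
  | zero => intro l acc; simp [PySem.Chars.count.go]
  | succ fuel ih =>
    intro l acc
    cases l with
    | nil => simp [PySem.Chars.count.go]
    | cons h t =>
      rw [PySem.Chars.count.go]
      split
      · exact le_trans (Nat.le_succ acc) (ih _ _)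
      · exact ih _ _

theorem pvGo_pos_iff (sub : List Char) (hsub : sub ≠ []) (fuel : Nat) : ∀ (l : List Char) (acc : Nat),
    l.length ≤ fuel → (acc < PySem.Chars.count.go sub fuel l acc ↔ sub <:+: l) := by
  induction fuel with
  | zero =>
    intro l acc hf
    have : l = [] := by cases l <;> simp_all
    subst this
    simp [PySem.Chars.count.go, List.infix_nil, hsub]
  | succ fuel ih =>
    intro l acc hf
    cases l with
    | nil => simp [PySem.Chars.count.go, List.infix_nil, hsub]
    | cons h t =>
      rw [PySem.Chars.count.go]
      split
      · rename_i hpre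
        constructor
        · intro _
          exact List.IsPrefix.isInfix (List.isPrefixOf_iff_prefix.mp hpre)
        · intro _
          calc acc < acc + 1 := Nat.lt_succ_self acc
            _ ≤ _ := pvGo_le sub fuel _ _
      · rename_i hpre
        have hnp : ¬ sub <+: (h :: t) := fun hp => hpre (List.isPrefixOf_iff_prefix.mpr hp)
        rw [ih t acc (by simpa using Nat.le_of_succ_le_succ hf)]
        rw [List.infix_cons_iff]
        tauto

theorem pvCount_pos_iff (s sub : List Char) (hsub : sub ≠ []) :
    0 < PySem.Chars.count s sub ↔ sub <:+: s := by
  have he : sub.isEmpty = false := by cases sub <;> simp_all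
  rw [PySem.Chars.count, he]
  simpa using pvGo_pos_iff sub hsub s.length s 0 (le_refl _)

theorem pvInfix_iff (m L : List Char) :
    m <:+: L ↔ ∃ j : Nat, j + m.length ≤ L.length ∧ (L.drop j).take m.length = m := by
  constructor
  · rintro ⟨s, t, rfl⟩
    refine ⟨s.length, by simp, ?_⟩
    rw [List.append_assoc, List.drop_left, List.take_left]
  · rintro ⟨j, hj, hm⟩
    refine ⟨L.take j, (L.drop j).drop m.length, ?_⟩
    conv_rhs => rw [← List.take_append_drop j L]
    rw [List.append_assoc]
    congr 1
    have h2 := List.take_append_drop m.length (L.drop j)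
    rw [hm] at h2
    exact h2

theorem pvSumPos_iff (l : List String) (f : String → Int) (h : ∀ x ∈ l, 0 ≤ f x) :
    0 < (l.map f).sum ↔ ∃ x ∈ l, 0 < f x := by
  induction l with
  | nil => simp
  | cons a l ih =>
    have ha : 0 ≤ f a := h a (List.mem_cons_self)
    have hs : 0 ≤ (l.map f).sum := by
      apply List.sum_nonneg
      intro x hx
      obtain ⟨y, hy, rfl⟩ := List.mem_map.mp hx
      exact h y (List.mem_cons_of_mem _ hy)
    have ih' := ih (fun x hx => h x (List.mem_cons_of_mem _ hx))
    simp only [List.map_cons, List.sum_cons, List.mem_cons]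
    constructor
    · intro hpos
      by_cases h1 : 0 < f a
      · exact ⟨a, Or.inl rfl, h1⟩
      · have hsum : 0 < (l.map f).sum := by omega
        obtain ⟨x, hx, hfx⟩ := ih'.mp hsum
        exact ⟨x, Or.inr hx, hfx⟩
    · rintro ⟨x, hx | hx, hfx⟩
      · subst hx; omega
      · have hsum : 0 < (l.map f).sum := ih'.mpr ⟨x, hx, hfx⟩
        omega

-- conditional set-building folds
theorem pvCondAddMem {ι : Type} (l : List ι) (f : ι → String) (p : ι → Bool) :
    ∀ (ks : List String) (y : String),
    (y ∈ l.foldl (fun ks i => if p i then PySem.Set.add ks (f i) else ks) ks ↔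
      y ∈ ks ∨ ∃ i ∈ l, p i ∧ y = f i) := by
  induction l with
  | nil => simp
  | cons a l ih =>
    intro ks y
    rw [List.foldl_cons, ih]
    by_cases hp : p a
    · simp only [hp, if_true, PySem.Set.mem_add, List.mem_cons]
      constructor
      · rintro ((h | rfl) | ⟨i, hi, hpi, rfl⟩)
        · exact Or.inl h
        · exact Or.inr ⟨a, Or.inl rfl, hp, rfl⟩
        · exact Or.inr ⟨i, Or.inr hi, hpi, rfl⟩
      · rintro (h | ⟨i, rfl | hi, hpi, rfl⟩)
        · exact Or.inl (Or.inl h)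
        · exact Or.inl (Or.inr rfl)
        · exact Or.inr ⟨i, hi, hpi, rfl⟩
    · simp only [hp, List.mem_cons]
      constructor
      · rintro (h | ⟨i, hi, hpi, rfl⟩)
        · exact Or.inl h
        · exact Or.inr ⟨i, Or.inr hi, hpi, rfl⟩
      · rintro (h | ⟨i, rfl | hi, hpi, rfl⟩)
        · exact Or.inl h
        · exact absurd hpi (by simp [hp])
        · exact Or.inr ⟨i, hi, hpi, rfl⟩

theorem pvCondAddNodup {ι : Type} (l : List ι) (f : ι → String) (p : ι → Bool) :
    ∀ (ks : List String), ks.Nodup →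
    (l.foldl (fun ks i => if p i then PySem.Set.add ks (f i) else ks) ks).Nodup := by
  induction l with
  | nil => intro ks h; simpa
  | cons a l ih =>
    intro ks h
    rw [List.foldl_cons]
    apply ih
    split
    · exact PySem.Set.nodup_add ks (f a) h
    · exact h

-- proof-side name for the set of present k-mers built by B
def pvKmers (k : Int) (db : List String) : List String :=
  db.foldl (fun ks seq =>
      (PySem.List.pyRange 0 (PySem.Str.len seq - k + 1) 1).foldl (fun ks i =>
        let m := PySem.Str.slice seq (some i) (some (i + k))
        if m.toList.all (fun c => decide (c ∈ pvACGT)) then PySem.Set.add ks m else ks) ks)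
    PySem.Set.empty

theorem pvKmers_mem_aux (k : Int) (db : List String) : ∀ (ks : List String) (y : String),
    (y ∈ db.foldl (fun ks seq =>
        (PySem.List.pyRange 0 (PySem.Str.len seq - k + 1) 1).foldl (fun ks i =>
          let m := PySem.Str.slice seq (some i) (some (i + k))
          if m.toList.all (fun c => decide (c ∈ pvACGT)) then PySem.Set.add ks m else ks) ks) ks ↔
      y ∈ ks ∨ ∃ seq ∈ db, ∃ i ∈ PySem.List.pyRange 0 (PySem.Str.len seq - k + 1) 1,
        (PySem.Str.slice seq (some i) (some (i + k))).toList.all (fun c => decide (c ∈ pvACGT)) ∧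
          y = PySem.Str.slice seq (some i) (some (i + k))) := by
  induction db with
  | nil => simp
  | cons seq db ih =>
    intro ks y
    rw [List.foldl_cons, ih]
    have hinner : (y ∈ (PySem.List.pyRange 0 (PySem.Str.len seq - k + 1) 1).foldl (fun ks i =>
          let m := PySem.Str.slice seq (some i) (some (i + k))
          if m.toList.all (fun c => decide (c ∈ pvACGT)) then PySem.Set.add ks m else ks) ks ↔
        y ∈ ks ∨ ∃ i ∈ PySem.List.pyRange 0 (PySem.Str.len seq - k + 1) 1,
          (PySem.Str.slice seq (some i) (some (i + k))).toList.all (fun c => decide (c ∈ pvACGT)) ∧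
            y = PySem.Str.slice seq (some i) (some (i + k))) :=
      pvCondAddMem (PySem.List.pyRange 0 (PySem.Str.len seq - k + 1) 1)
        (fun i => PySem.Str.slice seq (some i) (some (i + k)))
        (fun i => (PySem.Str.slice seq (some i) (some (i + k))).toList.all (fun c => decide (c ∈ pvACGT)))
        ks y
    rw [hinner]
    simp only [List.mem_cons]
    constructor
    · rintro ((h | h) | ⟨s, hs, h⟩)
      · exact Or.inl h
      · exact Or.inr ⟨seq, Or.inl rfl, h⟩
      · exact Or.inr ⟨s, Or.inr hs, h⟩
    · rintro (h | ⟨s, rfl | hs, h⟩)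
      · exact Or.inl (Or.inl h)
      · exact Or.inl (Or.inr h)
      · exact Or.inr ⟨s, hs, h⟩

theorem pvKmers_nodup (k : Int) (db : List String) : (pvKmers k db).Nodup := by
  rw [pvKmers]
  have : ∀ (ks : List String), ks.Nodup →
      (db.foldl (fun ks seq =>
        (PySem.List.pyRange 0 (PySem.Str.len seq - k + 1) 1).foldl (fun ks i =>
          let m := PySem.Str.slice seq (some i) (some (i + k))
          if m.toList.all (fun c => decide (c ∈ pvACGT)) then PySem.Set.add ks m else ks) ks) ks).Nodup := by
    induction db with
    | nil => intro ks h; simpa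
    | cons seq db ih =>
      intro ks h
      rw [List.foldl_cons]
      apply ih
      exact pvCondAddNodup (PySem.List.pyRange 0 (PySem.Str.len seq - k + 1) 1)
        (fun i => PySem.Str.slice seq (some i) (some (i + k)))
        (fun i => (PySem.Str.slice seq (some i) (some (i + k))).toList.all (fun c => decide (c ∈ pvACGT)))
        ks h
  exact this [] List.nodup_nil

theorem pvStr_toList_inj (s t : String) (h : s.toList = t.toList) : s = t := by
  have := congrArg String.ofList h
  simpa using this

theorem pvSlice_toList (seq : String) (i k : Int) (h0 : 0 ≤ i) (hk : 1 ≤ k) :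
    (PySem.Str.slice seq (some i) (some (i + k))).toList
      = (seq.toList.drop i.toNat).take k.toNat := by
  have h1 : (PySem.Str.slice seq (some i) (some (i + k))).toList
      = PySem.List.slice seq.toList (some i) (some (i + k)) := by
    simp [PySem.Str.slice]
  rw [h1, PySem.List.slice_toNat seq.toList h0 (by omega)]
  congr 1
  omega

theorem pvStrLen_eq (s : String) : PySem.Str.len s = (s.toList.length : Int) := by
  simp [PySem.Str.len]

theorem pvKmers_mem (k : Int) (hk : 1 ≤ k) (db : List String) (y : String) :
    y ∈ pvKmers k db ↔
      (y.toList.length = k.toNat ∧ (∀ c ∈ y.toList, c ∈ pvBaseChars) ∧ 0 < pvTotal y.toList db) := by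
  rw [pvKmers, show (PySem.Set.empty : PySem.Set String) = ([] : List String) from rfl,
    pvKmers_mem_aux k db [] y]
  simp only [List.not_mem_nil, false_or]
  constructor
  · rintro ⟨seq, hseq, i, hi, hall, rfl⟩
    rw [PySem.List.mem_pyRange_one, pvStrLen_eq] at hi
    obtain ⟨h0, hlt⟩ := hi
    have hik : i.toNat + k.toNat ≤ seq.toList.length := by omega
    have htl := pvSlice_toList seq i k h0 hk
    have hlen : (PySem.Str.slice seq (some i) (some (i + k))).toList.length = k.toNat := by
      rw [htl]
      simp only [List.length_take, List.length_drop]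
      omega
    refine ⟨hlen, ?_, ?_⟩
    · intro c hc
      rw [List.all_eq_true] at hall
      have := hall c hc
      rw [decide_eq_true_iff, pvACGT, PySem.Set.mem_ofList] at this
      exact this
    · rw [pvTotal, pvSumPos_iff _ _ (fun x _ => by positivity)]
      refine ⟨seq, hseq, ?_⟩
      have hne : (PySem.Str.slice seq (some i) (some (i + k))).toList ≠ [] := by
        intro h; rw [h] at hlen; simp at hlen; omega
      rw [Int.natCast_pos, pvCount_pos_iff _ _ hne, pvInfix_iff]
      exact ⟨i.toNat, by rw [hlen]; omega, by rw [hlen, htl]⟩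
  · rintro ⟨hlen, hch, hpos⟩
    rw [pvTotal, pvSumPos_iff _ _ (fun x _ => by positivity)] at hpos
    obtain ⟨seq, hseq, hcnt⟩ := hpos
    rw [Int.natCast_pos] at hcnt
    have hne : y.toList ≠ [] := by
      intro h; rw [h] at hlen; simp at hlen; omega
    rw [pvCount_pos_iff _ _ hne, pvInfix_iff] at hcnt
    obtain ⟨j, hj, htake⟩ := hcnt
    refine ⟨seq, hseq, (j : Int), ?_, ?_, ?_⟩
    · rw [PySem.List.mem_pyRange_one, pvStrLen_eq]
      constructor
      · positivity
      · rw [hlen] at hj; omega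
    · rw [List.all_eq_true]
      have htl := pvSlice_toList seq (j : Int) k (by positivity) hk
      intro c hc
      rw [decide_eq_true_iff, pvACGT, PySem.Set.mem_ofList]
      apply hch
      rw [htl] at hc
      rw [← htake, hlen]
      exact hc
    · apply pvStr_toList_inj
      symm
      rw [pvSlice_toList seq (j : Int) k (by positivity) hk]
      rw [Int.toNat_natCast, ← hlen]
      exact htake

theorem pvFoldSel_filter {α : Type} (g : α → Int) (l : List α) : ∀ (st : α × Int), 0 ≤ st.2 →
    l.foldl (fun st m => if g m > st.2 then (m, g m) else st) st
      = (l.filter (fun m => decide (0 < g m))).foldl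
          (fun st m => if g m > st.2 then (m, g m) else st) st := by
  induction l with
  | nil => intro st _; rfl
  | cons a l ih =>
    intro st hst
    by_cases hp : 0 < g a
    · rw [List.filter_cons_of_pos (by simpa using hp), List.foldl_cons, List.foldl_cons]
      apply ih
      split
      · simpa using le_of_lt hp
      · exact hst
    · rw [List.filter_cons_of_neg (by simpa using hp), List.foldl_cons]
      rw [if_neg (by omega)]
      exact ih st hst

theorem pvFoldSel_map (gA : List Char → Int) (gB : String → Int)
    (hg : ∀ m, gB (String.ofList m) = gA m) (l : List (List Char)) : ∀ (w : List Char) (x : Int),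
    (l.map String.ofList).foldl (fun st m => if gB m > st.2 then (m, gB m) else st) (String.ofList w, x)
      = (fun r => (String.ofList r.1, r.2))
          (l.foldl (fun st m => if gA m > st.2 then (m, gA m) else st) (w, x)) := by
  induction l with
  | nil => intro w x; rfl
  | cons a l ih =>
    intro w x
    rw [List.map_cons, List.foldl_cons, List.foldl_cons]
    simp only [hg a]
    by_cases hp : gA a > x
    · rw [if_pos hp, if_pos hp]
      exact ih a (gA a)
    · rw [if_neg hp, if_neg hp]
      exact ih w x

-- ===== VERDICT (by name: the statement is the Claim_ definition above) =====
theorem get_motif_spec : Claim_equal_get_motif := by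
  unfold Claim_equal_get_motif Spec_get_motif Pre_get_motif
  intro k db _ hk
  have hW : pvGetCombinations k [[]] [['A'], ['C'], ['G'], ['T']] = pvWords k.toNat := by
    have h := pvGC_words (k - 1).toNat 0
    rw [show (((k - 1).toNat : Int) + 1) = k by omega] at h
    rw [show 0 + (k - 1).toNat + 1 = k.toNat by omega] at h
    exact h
  have hgAB : ∀ m : List Char,
      (db.map (fun seq => (PySem.Str.count seq (String.ofList m) : Int))).sum = pvCountMotif m db := by
    intro m
    rw [pvCountMotif, PySem.List.foldl_add, zero_add]
    have hc : ∀ seq : String, PySem.Str.count seq (String.ofList m) = PySem.Chars.count seq.toList m := by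
      intro seq; simp [PySem.Str.count]
    simp only [hc]
  have hTot : ∀ m : List Char, pvTotal m db = pvCountMotif m db := by
    intro m
    rw [pvTotal, pvCountMotif, PySem.List.foldl_add, zero_add]
  have hA : get_motif k db = (fun r => (String.ofList r.1, r.2))
      (((pvWords k.toNat).filter (fun m => decide (0 < pvCountMotif m db))).foldl
        (fun st m => if pvCountMotif m db > st.2 then (m, pvCountMotif m db) else st) ([], 0)) := by
    have h0 : get_motif k db = (fun r => (String.ofList r.1, r.2))
        ((pvGetCombinations k [[]] [['A'], ['C'], ['G'], ['T']]).foldl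
          (fun st m => if pvCountMotif m db > st.2 then (m, pvCountMotif m db) else st) ([], 0)) := rfl
    rw [h0, hW, pvFoldSel_filter (fun m => pvCountMotif m db) (pvWords k.toNat) ([], 0) (le_refl 0)]
  have hPairF : ((pvWords k.toNat).filter (fun m => decide (0 < pvCountMotif m db))).Pairwise
      (List.Lex (· < ·)) :=
    List.Pairwise.sublist List.filter_sublist (pvWords_pairwise k.toNat)
  have hPairMap : (((pvWords k.toNat).filter (fun m => decide (0 < pvCountMotif m db))).map
      String.ofList).Pairwise (· < ·) :=
    (List.pairwise_map).mpr (hPairF.imp (fun h => pvStrLt _ _ h))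
  have hNodupMap : (((pvWords k.toNat).filter (fun m => decide (0 < pvCountMotif m db))).map
      String.ofList).Nodup :=
    hPairMap.imp (fun h => ne_of_lt h)
  have hSorted : PySem.List.sorted (pvKmers k db) (fun x => x)
      = ((pvWords k.toNat).filter (fun m => decide (0 < pvCountMotif m db))).map String.ofList := by
    apply PySem.List.sorted_eq_of_perm_of_pairwise_lt
    · rw [List.perm_ext_iff_of_nodup hNodupMap (pvKmers_nodup k db)]
      intro y
      rw [pvKmers_mem k hk db y]
      constructor
      · intro hy
        obtain ⟨m, hm, rfl⟩ := List.mem_map.mp hy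
        obtain ⟨hmW, hmPos⟩ := List.mem_filter.mp hm
        obtain ⟨hmLen, hmCh⟩ := (pvMem_words _ m).mp hmW
        have htl : (String.ofList m).toList = m := by simp
        rw [decide_eq_true_iff] at hmPos
        refine ⟨by rw [htl, hmLen], by rw [htl]; exact hmCh, ?_⟩
        rw [htl, hTot]
        exact hmPos
      · rintro ⟨hyLen, hyCh, hyPos⟩
        refine List.mem_map.mpr ⟨y.toList, List.mem_filter.mpr ⟨?_, ?_⟩, ?_⟩
        · exact (pvMem_words _ _).mpr ⟨hyLen, hyCh⟩
        · rw [decide_eq_true_iff, ← hTot]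
          exact hyPos
        · exact pvStr_toList_inj _ _ (by simp)
    · exact hPairMap
  have hB : get_motif_alt k db
      = (((pvWords k.toNat).filter (fun m => decide (0 < pvCountMotif m db))).map String.ofList).foldl
          (fun st m => if (db.map (fun seq => (PySem.Str.count seq m : Int))).sum > st.2
            then (m, (db.map (fun seq => (PySem.Str.count seq m : Int))).sum) else st) ("", 0) := by
    have h0 : get_motif_alt k db = (PySem.List.sorted (pvKmers k db) (fun x => x)).foldl
        (fun st m => if (db.map (fun seq => (PySem.Str.count seq m : Int))).sum > st.2
          then (m, (db.map (fun seq => (PySem.Str.count seq m : Int))).sum) else st) ("", 0) := rfl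
    rw [h0, hSorted]
  rw [hA, hB, show ("" : String) = String.ofList [] from rfl]
  exact (pvFoldSel_map (fun m => pvCountMotif m db)
    (fun s => (db.map (fun seq => (PySem.Str.count seq s : Int))).sum) hgAB _ [] 0).symm
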